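-- pv_equiv track=rewrite | github.com/wtain/LeetCodePython | Algorithms/Basic/Backtracking/CircularPermutationInBinaryRepresentation.py | customCheck
-- ===== SOURCE A (Python) =====
-- def customCheck(test, result):
--     n = test[0]
--     start = test[1]
--     m = 1 << n
--
--     def isPowerOfTwo(n: int) -> bool:
--         return n > 0 and n & (n-1) == 0
--
--     if len(result) != m:
--         return False
--     if list(sorted(result)) != list(range(m)):
--         return False
--     if result[0] != start:
--         return False
--     for i in range(m):
--         j = (i+m-1) % m
--         diff = result[i] ^ result[j]
--         if not isPowerOfTwo(diff):
--             return False
--     return True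
-- ===== SOURCE B (Python) =====
-- def customCheck(test, result):
--     n = test[0]
--     start = test[1]
--     m = 1 << n
--     if len(result) != m or result[0] != start:
--         return False
--     prev = result[m - 1]
--     seen = set()
--     for v in result:
--         if v < 0 or v >= m or v in seen:
--             return False
--         d = v ^ prev
--         if d <= 0 or d & (d - 1) != 0:
--             return False
--         seen.add(v)
--         prev = v
--     return True
-- ===== Notes on version B (the rewrite author's own statement) =====
-- stated objective: alternative
-- what changed: Replaces the sort-and-compare-to-range permutation test plus the separate circular index loop with one fused forward pass that maintains a seen-set and checks range, freshness and power-of-two XOR with the previous element (result[m-1] seeding the circular wrap); intended as faster (O(m) vs O(m log m)) but a timing run read only 1.64x at the largest size, not consistently confirmed.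
import Mathlib
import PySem

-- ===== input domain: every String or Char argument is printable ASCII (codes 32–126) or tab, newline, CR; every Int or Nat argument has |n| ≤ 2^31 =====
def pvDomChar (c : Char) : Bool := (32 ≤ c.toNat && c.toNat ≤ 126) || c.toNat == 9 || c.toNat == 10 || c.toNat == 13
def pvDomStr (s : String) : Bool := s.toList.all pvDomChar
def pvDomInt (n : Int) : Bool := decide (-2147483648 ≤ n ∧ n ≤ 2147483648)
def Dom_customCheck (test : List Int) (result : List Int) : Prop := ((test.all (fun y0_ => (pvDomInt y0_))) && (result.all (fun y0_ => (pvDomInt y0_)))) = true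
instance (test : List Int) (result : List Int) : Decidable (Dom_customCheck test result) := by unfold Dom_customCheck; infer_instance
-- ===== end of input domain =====

-- B fuses A's sort-and-compare permutation test and separate circular index loop into one
-- forward pass with a seen-set; equivalence of the return values is proved below.

-- ===== PORT A =====
-- A's nested helper isPowerOfTwo
def pvIsPowerOfTwo (n : Int) : Bool :=
  decide (n > 0) && (PySem.Int.band n (n - 1) == 0)

def customCheck (test : List Int) (result : List Int) : Bool :=
  let n := PySem.List.pyGetD test 0 0
  let start := PySem.List.pyGetD test 1 0
  let m : Int := (1 : Int) <<< n.toNat   -- 1 << n; Pre_ keeps n ≥ 0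
  if (result.length : Int) ≠ m then false
  else if PySem.List.sorted result (fun x => x) false ≠ PySem.List.pyRange 0 m 1 then false
  else if PySem.List.pyGetD result 0 0 ≠ start then false
  else (PySem.List.pyRange 0 m 1).all (fun i =>
    -- j = (i + m - 1) % m, inlined
    pvIsPowerOfTwo (PySem.Int.bxor (PySem.List.pyGetD result i 0)
      (PySem.List.pyGetD result (PySem.Int.mod (i + m - 1) m) 0)))

-- ===== PORT B =====
-- the 'for v in result' loop of Source B, with its early returns
def pvAltLoop (m : Int) : List Int → PySem.Set Int → Int → Bool
  | [], _, _ => true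
  | v :: rest, seen, prev =>
    if v < 0 ∨ m ≤ v ∨ v ∈ seen then false
    else
      let d := PySem.Int.bxor v prev
      if d ≤ 0 ∨ PySem.Int.band d (d - 1) ≠ 0 then false
      else pvAltLoop m rest (PySem.Set.add seen v) v

def customCheck_alt (test : List Int) (result : List Int) : Bool :=
  let n := PySem.List.pyGetD test 0 0
  let start := PySem.List.pyGetD test 1 0
  let m : Int := (1 : Int) <<< n.toNat
  if (result.length : Int) ≠ m ∨ PySem.List.pyGetD result 0 0 ≠ start then false
  else pvAltLoop m result PySem.Set.empty (PySem.List.pyGetD result (m - 1) 0)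

-- ===== PRECONDITION & SPEC =====
-- Pre_ excludes exactly the inputs where the Python A raises: test shorter than 2
-- (IndexError on test[0]/test[1]) or a negative shift count test[0] (ValueError on 1 << n).
def Pre_customCheck (test : List Int) (result : List Int) : Prop :=
  2 ≤ test.length ∧ 0 ≤ test.getD 0 0
instance (test : List Int) (result : List Int) : Decidable (Pre_customCheck test result) := by
  unfold Pre_customCheck; infer_instance

def pvWitness_customCheck : List Int × List Int := ([1, 0], [0, 1])

def Spec_customCheck (test : List Int) (result : List Int) (out : Bool) : Prop := out = customCheck_alt test result
instance (test : List Int) (result : List Int) (out : Bool) : Decidable (Spec_customCheck test result out) := by unfold Spec_customCheck; infer_instance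

-- ===== CLAIM (what is proved, stated in full; the proofs are below) =====
def Claim_equal_customCheck : Prop := ∀ (test : List Int) (result : List Int), Dom_customCheck test result → Pre_customCheck test result → Spec_customCheck test result (customCheck test result)

-- ===== LEMMAS AND PROOFS =====

-- the adjacency relation both loops check: XOR of consecutive elements is a power of two
def pvAdj (a b : Int) : Prop := pvIsPowerOfTwo (PySem.Int.bxor b a) = true


-- characterization of B's fused loop
theorem pvAltLoop_iff (m : Int) (l : List Int) (seen : PySem.Set Int) (prev : Int) :
    pvAltLoop m l seen prev = true ↔
      (∀ v ∈ l, 0 ≤ v ∧ v < m ∧ v ∉ seen) ∧ l.Nodup ∧ List.IsChain pvAdj (prev :: l) := by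
  induction l generalizing seen prev with
  | nil => simp [pvAltLoop]
  | cons v rest ih =>
    simp only [pvAltLoop]
    by_cases h1 : v < 0 ∨ m ≤ v ∨ v ∈ seen
    · simp only [if_pos h1, List.mem_cons]
      constructor
      · intro h; cases h
      · rintro ⟨hall, -, -⟩
        rcases hall v (Or.inl rfl) with ⟨hv0, hvm, hvs⟩
        rcases h1 with h | h | h <;> [omega; omega; exact absurd h hvs]
    · rw [if_neg h1]
      push_neg at h1
      obtain ⟨hv0, hvm, hvs⟩ := h1
      by_cases h2 : PySem.Int.bxor v prev ≤ 0 ∨ PySem.Int.band (PySem.Int.bxor v prev) (PySem.Int.bxor v prev - 1) ≠ 0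
      · simp only [if_pos h2]
        constructor
        · intro h; cases h
        · rintro ⟨-, -, hch⟩
          rw [List.isChain_cons_cons] at hch
          have := hch.1
          unfold pvAdj pvIsPowerOfTwo at this
          simp only [Bool.and_eq_true, decide_eq_true_eq, beq_iff_eq] at this
          rcases h2 with h | h <;> omega
      · rw [if_neg h2]
        push_neg at h2
        rw [ih]
        simp only [List.mem_cons, List.nodup_cons, List.isChain_cons_cons, PySem.Set.mem_add]
        constructor
        · rintro ⟨hall, hnd, hch⟩
          refine ⟨?_, ⟨?_, hnd⟩, ?_, hch⟩
          · rintro w (rfl | hw)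
            · exact ⟨hv0, by omega, hvs⟩
            · rcases hall w hw with ⟨a, b, c⟩
              exact ⟨a, b, fun hmem => c (Or.inl hmem)⟩
          · intro hvr
            rcases hall v hvr with ⟨-, -, c⟩
            exact c (Or.inr rfl)
          · unfold pvAdj pvIsPowerOfTwo
            simp only [Bool.and_eq_true, decide_eq_true_eq, beq_iff_eq]
            omega
        · rintro ⟨hall, ⟨hvr, hnd⟩, -, hch⟩
          refine ⟨?_, hnd, hch⟩
          intro w hw
          rcases hall w (Or.inr hw) with ⟨a, b, c⟩
          refine ⟨a, b, ?_⟩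
          rintro (hmem | rfl)
          · exact c hmem
          · exact hvr hw

-- the sorted-equals-range test is the permutation property
theorem pvSorted_iff (m : Int) (result : List Int) (hlen : (result.length : Int) = m) :
    PySem.List.sorted result (fun x => x) false = PySem.List.pyRange 0 m 1 ↔
      (∀ v ∈ result, 0 ≤ v ∧ v < m) ∧ result.Nodup := by
  constructor
  · intro h
    have hperm : (PySem.List.pyRange 0 m 1).Perm result := by
      rw [← h]; exact PySem.List.sorted_perm result (fun x => x) false
    constructor
    · intro v hv
      have : v ∈ PySem.List.pyRange 0 m 1 := hperm.mem_iff.mpr hv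
      rw [PySem.List.mem_pyRange_one] at this
      exact this
    · exact hperm.nodup (PySem.List.nodup_pyRange_one 0 m)
  · rintro ⟨hmem, hnd⟩
    have hsub : result ⊆ PySem.List.pyRange 0 m 1 := by
      intro v hv
      rw [PySem.List.mem_pyRange_one]
      exact hmem v hv
    have hsp : result.Subperm (PySem.List.pyRange 0 m 1) := List.subperm_of_subset hnd hsub
    have hlen' : (PySem.List.pyRange 0 m 1).length ≤ result.length := by
      rw [PySem.List.length_pyRange_one]
      omega
    have hperm : (PySem.List.pyRange 0 m 1).Perm result := (hsp.perm_of_length_le hlen').symm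
    exact PySem.List.sorted_eq_of_perm_of_pairwise_lt result (PySem.List.pyRange 0 m 1)
      (fun x => x) hperm (PySem.List.pairwise_lt_pyRange_one 0 m)

-- A's circular index loop is the chain condition seeded with the last element
theorem pvALoop_iff (m : Int) (result : List Int) (hpos : 0 < m)
    (hlen : (result.length : Int) = m) :
    ((PySem.List.pyRange 0 m 1).all (fun i =>
      pvIsPowerOfTwo (PySem.Int.bxor (PySem.List.pyGetD result i 0)
        (PySem.List.pyGetD result (PySem.Int.mod (i + m - 1) m) 0)))) = true ↔
      List.IsChain pvAdj (PySem.List.pyGetD result (m - 1) 0 :: result) := by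
  have hM : 0 < result.length := by omega
  have hmod0 : PySem.Int.mod (0 + m - 1) m = m - 1 := by
    rw [PySem.Int.mod_eq_emod_of_pos hpos]
    have h1 : (0:Int) + m - 1 = m - 1 := by ring
    rw [h1, Int.emod_eq_of_lt (by omega) (by omega)]
  have hmodS : ∀ i : Int, 1 ≤ i → i < m → PySem.Int.mod (i + m - 1) m = i - 1 := by
    intro i h1 h2
    rw [PySem.Int.mod_eq_emod_of_pos hpos]
    have h3 : i + m - 1 = (i - 1) + m * 1 := by ring
    rw [h3, Int.add_mul_emod_self_left, Int.emod_eq_of_lt (by omega) (by omega)]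
  have hget : ∀ (k : Nat) (hk : k < result.length),
      PySem.List.pyGetD result (k : Int) 0 = result[k] := by
    intro k hk
    rw [PySem.List.pyGetD_eq_getElem result 0 (by omega) (by omega)]
    simp
  have hget0 : PySem.List.pyGetD result 0 0 = result[0]'hM := by
    simpa using hget 0 hM
  rw [List.all_eq_true, List.isChain_iff_getElem]
  constructor
  · intro h k hk
    simp only [List.length_cons] at hk
    match k, hk with
    | 0, hk =>
      have h0 := h 0 (by rw [PySem.List.mem_pyRange_one]; omega)
      simp only [hmod0] at h0
      rw [hget0] at h0
      simp only [List.getElem_cons_zero, List.getElem_cons_succ]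
      unfold pvAdj
      exact h0
    | (j+1), hk =>
      have hstep := h ((j : Int) + 1) (by rw [PySem.List.mem_pyRange_one]; omega)
      rw [hmodS ((j : Int) + 1) (by omega) (by omega)] at hstep
      have e2 : ((j : Int) + 1 - 1) = ((j : Nat) : Int) := by push_cast; ring
      have e1 : ((j : Int) + 1) = ((j + 1 : Nat) : Int) := by push_cast; ring
      rw [e2, hget j (by omega)] at hstep
      rw [e1, hget (j + 1) (by omega)] at hstep
      simp only [List.getElem_cons_succ]
      unfold pvAdj
      exact hstep
  · intro h i hi
    rw [PySem.List.mem_pyRange_one] at hi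
    lift i to ℕ using hi.1 with k hkdef
    have hkm : k < result.length := by omega
    match k, hkm with
    | 0, hkm =>
      have hc := h 0 (by simp only [List.length_cons]; omega)
      simp only [List.getElem_cons_zero, List.getElem_cons_succ] at hc
      unfold pvAdj at hc
      simp only [Nat.cast_zero, hmod0]
      rw [hget0]
      exact hc
    | (j+1), hkm =>
      have hc := h (j + 1) (by simp only [List.length_cons]; omega)
      simp only [List.getElem_cons_succ] at hc
      unfold pvAdj at hc
      rw [hmodS ((j + 1 : Nat) : Int) (by omega) (by omega)]
      have e2 : (((j + 1 : Nat) : Int) - 1) = ((j : Nat) : Int) := by push_cast; ring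
      rw [e2, hget j (by omega), hget (j + 1) (by omega)]
      exact hc

-- ===== VERDICT (by name: the statement is the Claim_ definition above) =====
theorem customCheck_spec : Claim_equal_customCheck := by
  intro test result _ _
  unfold Spec_customCheck
  simp only [customCheck, customCheck_alt]
  set n := PySem.List.pyGetD test 0 0 with hn
  set start := PySem.List.pyGetD test 1 0 with hst
  set m : Int := (1 : Int) <<< n.toNat with hm
  have hmpos : 0 < m := by
    rw [hm, Int.shiftLeft_eq]
    positivity
  by_cases hlen : (result.length : Int) = m
  · rw [if_neg (by omega : ¬ ((result.length : Int) ≠ m))]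
    by_cases hs : PySem.List.pyGetD result 0 0 = start
    · rw [if_neg (not_or.mpr ⟨not_not.mpr hlen, not_not.mpr hs⟩)]
      rw [Bool.eq_iff_iff, pvAltLoop_iff]
      constructor
      · intro hA
        by_cases hsort : PySem.List.sorted result (fun x => x) false ≠ PySem.List.pyRange 0 m 1
        · rw [if_pos hsort] at hA
          exact absurd hA (by simp)
        · rw [if_neg hsort, if_neg (not_not.mpr hs)] at hA
          obtain ⟨hb, hnd⟩ := (pvSorted_iff m result hlen).mp (not_not.mp hsort)
          have hch := (pvALoop_iff m result hmpos hlen).mp hA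
          refine ⟨fun v hv => ⟨(hb v hv).1, (hb v hv).2, ?_⟩, hnd, hch⟩
          simp [PySem.Set.empty]
      · rintro ⟨hb, hnd, hch⟩
        have hsort : PySem.List.sorted result (fun x => x) false = PySem.List.pyRange 0 m 1 :=
          (pvSorted_iff m result hlen).mpr ⟨fun v hv => ⟨(hb v hv).1, (hb v hv).2.1⟩, hnd⟩
        rw [if_neg (not_not.mpr hsort), if_neg (not_not.mpr hs)]
        exact (pvALoop_iff m result hmpos hlen).mpr hch
    · rw [if_pos (Or.inr hs)]
      by_cases h1 : PySem.List.sorted result (fun x => x) false ≠ PySem.List.pyRange 0 m 1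
      · rw [if_pos h1]
      · rw [if_neg h1, if_pos hs]
  · rw [if_pos hlen, if_pos (Or.inl hlen)]
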